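-- pv_equiv track=rewrite | github.com/coldzero94/algorithm_study | python/10. 정수 제곱근 판별/answer.py | solution
-- ===== SOURCE A (Python) =====
-- def solution(n):
--     answer = 0
--     for i in range(2,n):
--         if n%i**2 == 0:
--             answer+=(i+1)**2
--         else:
--             answer+=-1
--     return answer
-- ===== SOURCE B (Python) =====
-- def solution(n):
--     # Every i in [2, n) contributes -1, except i with i*i dividing n
--     # (necessarily i <= sqrt(n)), which contributes (i+1)**2, i.e. (i+1)**2 + 1 extra.
--     if n < 3:
--         return 0
--     ans = -(n - 2)
--     i = 2
--     while i * i <= n: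
--         if n % (i * i) == 0:
--             ans += (i + 1) ** 2 + 1
--         i += 1
--     return ans
-- ===== Notes on version B (the rewrite author's own statement) =====
-- stated objective: faster
-- what changed: Instead of scanning every i in [2,n), B starts from the constant -(n-2) and only scans i up to sqrt(n), adding (i+1)^2+1 for each i whose square divides n (larger i can never qualify).
import Mathlib
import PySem

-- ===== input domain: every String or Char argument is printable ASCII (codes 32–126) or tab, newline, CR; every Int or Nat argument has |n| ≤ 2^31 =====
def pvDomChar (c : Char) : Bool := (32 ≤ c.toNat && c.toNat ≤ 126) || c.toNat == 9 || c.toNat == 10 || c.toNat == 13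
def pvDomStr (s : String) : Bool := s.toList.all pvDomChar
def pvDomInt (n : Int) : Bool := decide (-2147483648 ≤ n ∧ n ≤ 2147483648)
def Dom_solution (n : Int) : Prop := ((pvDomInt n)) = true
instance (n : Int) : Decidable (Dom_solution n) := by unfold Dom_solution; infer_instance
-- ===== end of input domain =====

-- B is an O(√n) re-implementation of A's O(n) scan: it starts from -(n-2) and only
-- tests the divisors i ≤ √n; return value only, no side effects involved.

-- ===== PORT A =====
def solution (n : Int) : Int :=
  (PySem.List.pyRange 2 n 1).foldl
    (fun answer i =>
      if PySem.Int.mod n (i ^ 2) = 0 then answer + (i + 1) ^ 2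
      else answer + (-1)) 0

-- ===== PORT B =====
-- termination helper for the while-loop of Source B (cited by decreasing_by)
theorem solutionAltLoop_dec {n i : Int} (h : i * i ≤ n) :
    (n + 1 - (i + 1)).toNat < (n + 1 - i).toNat := by
  have hi : i ≤ n := by nlinarith [sq_nonneg i, sq_nonneg (i - 1)]
  omega

def solutionAltLoop (n i : Int) : Int :=
  if h : i * i ≤ n then
    (if PySem.Int.mod n (i * i) = 0 then (i + 1) ^ 2 + 1 else 0) + solutionAltLoop n (i + 1)
  else 0
termination_by (n + 1 - i).toNat
decreasing_by exact solutionAltLoop_dec h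

def solution_alt (n : Int) : Int :=
  if n < 3 then 0 else -(n - 2) + solutionAltLoop n 2

-- ===== PRECONDITION & SPEC =====
def Spec_solution (n : Int) (out : Int) : Prop := out = solution_alt n
instance (n : Int) (out : Int) : Decidable (Spec_solution n out) := by unfold Spec_solution; infer_instance

-- ===== CLAIM (what is proved, stated in full; the proofs are below) =====
def Claim_equal_solution : Prop := ∀ (n : Int), Dom_solution n → Spec_solution n (solution n)

-- ===== LEMMAS AND PROOFS =====

-- the "bonus" each qualifying i contributes beyond the universal -1
def pvBonus (n i : Int) : Int :=
  if PySem.Int.mod n (i * i) = 0 then (i + 1) ^ 2 + 1 else 0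

theorem pvBonus_zero {n i : Int} (hn : 0 < n) (hlt : n < i * i) : pvBonus n i = 0 := by
  unfold pvBonus
  have hpos : 0 < i * i := lt_trans hn hlt
  rw [PySem.Int.mod_eq_emod_of_pos hpos]
  have h2 : n % (i * i) = n := Int.emod_eq_of_lt (le_of_lt hn) hlt
  rw [h2, if_neg (by omega)]

-- A's loop is  0 + Σ_{i∈[2,n)} (pvBonus n i - 1)
theorem solution_eq_sum (n : Int) :
    solution n = ((PySem.List.pyRange 2 n 1).map (fun i => pvBonus n i)).sum
      - ((PySem.List.pyRange 2 n 1).length : Int) := by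
  unfold solution
  have hf : (fun (answer i : Int) =>
      if PySem.Int.mod n (i ^ 2) = 0 then answer + (i + 1) ^ 2 else answer + (-1))
      = fun answer i => answer + (pvBonus n i + (-1)) := by
    funext a i
    unfold pvBonus
    have : i ^ 2 = i * i := sq i
    rw [this]
    split_ifs <;> ring
  rw [hf, PySem.List.foldl_add]
  rw [PySem.List.sum_map_add_int]
  simp
  ring

-- B's loop computes the same bonus sum over the tail [i, n) (terms past √n vanish)
theorem solutionAltLoop_eq_sum (n : Int) (hn : 3 ≤ n) :
    ∀ (i : Int), 2 ≤ i →
      solutionAltLoop n i = ((PySem.List.pyRange i n 1).map (fun j => pvBonus n j)).sum := by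
  intro i
  induction i using solutionAltLoop.induct n with
  | case1 i h ih =>
    intro h2
    have hin : i < n := by nlinarith
    rw [solutionAltLoop, dif_pos h, PySem.List.pyRange_one_cons hin]
    rw [ih (by omega)]
    simp [pvBonus]
  | case2 i h =>
    intro h2
    rw [solutionAltLoop, dif_neg h]
    have hzero : ∀ x ∈ (PySem.List.pyRange i n 1).map (fun j => pvBonus n j), x = 0 := by
      intro x hx
      simp only [List.mem_map] at hx
      obtain ⟨j, hj, rfl⟩ := hx
      rw [PySem.List.mem_pyRange_one] at hj
      have hij : i * i ≤ j * j := by nlinarith [hj.1]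
      exact pvBonus_zero (by omega) (by omega)
    exact (List.sum_eq_zero hzero).symm

-- ===== VERDICT (by name: the statement is the Claim_ definition above) =====
theorem solution_spec : Claim_equal_solution := by
  intro n _
  unfold Spec_solution solution_alt
  by_cases h3 : n < 3
  · rw [if_pos h3]
    unfold solution
    rcases Int.lt_or_le n 3 with _ | _
    · by_cases h2 : n ≤ 2
      · rw [PySem.List.pyRange_one_eq_nil h2]
        simp
      · omega
    · omega
  · rw [if_neg h3]
    rw [Int.not_lt] at h3
    rw [solution_eq_sum, solutionAltLoop_eq_sum n h3 2 (le_refl 2)]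
    rw [PySem.List.length_pyRange_one]
    have : ((n - 2).toNat : Int) = n - 2 := by omega
    rw [this]
    ring
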